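-- pv_equiv track=rewrite | github.com/rcalefDeprecated/Python_projects | markov/markov.py | kmers_from_sequence
-- ===== SOURCE A (Python) =====
-- def kmers_from_sequence(sequence,alphabet,k):
-- 	upper_bound = len(sequence)-k+1
-- 	for itor in range(upper_bound):
-- 		if sequence[itor] not in alphabet: continue
-- 		kmer=""
-- 		char_check=itor
-- #Want to build up next kmer, skipping characters not in alphabet
-- 		while len(kmer) < k:
-- #If char_check runs off end of sequence, then no more kmeers, return
-- 			if char_check == len(sequence): return
-- 			if sequence[char_check] in alphabet: kmer += sequence[char_check]
-- 			char_check += 1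
-- 		yield kmer
-- ===== SOURCE B (Python) =====
-- def kmers_from_sequence(sequence, alphabet, k):
--     # One pass precomputes the ordered positions of alphabet chars and the
--     # filtered string; each k-mer is then a single slice of the filtered
--     # string (no per-kmer gap rescans).
--     upper_bound = len(sequence) - k + 1
--     pos = []
--     filt = []
--     for i, c in enumerate(sequence):
--         if c in alphabet:
--             pos.append(i)
--             filt.append(c)
--     filtstr = "".join(filt)
--     total = len(pos)
--     for j, p in enumerate(pos):
--         if p >= upper_bound or j + k > total:
--             return
--         yield filtstr[j:j+k]
-- ===== Notes on version B (the rewrite author's own statement) =====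
-- stated objective: alternative
-- what changed: B makes one pass collecting the positions of alphabet characters and the filtered string, then emits each k-mer as a single slice of that string, instead of A's per-start-position rescan over the gaps of non-alphabet characters; intended as faster (measured 12-62x at sizes where both finish) but unconfirmed at the largest size, where the output itself is quadratic and both time out.
import Mathlib
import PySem

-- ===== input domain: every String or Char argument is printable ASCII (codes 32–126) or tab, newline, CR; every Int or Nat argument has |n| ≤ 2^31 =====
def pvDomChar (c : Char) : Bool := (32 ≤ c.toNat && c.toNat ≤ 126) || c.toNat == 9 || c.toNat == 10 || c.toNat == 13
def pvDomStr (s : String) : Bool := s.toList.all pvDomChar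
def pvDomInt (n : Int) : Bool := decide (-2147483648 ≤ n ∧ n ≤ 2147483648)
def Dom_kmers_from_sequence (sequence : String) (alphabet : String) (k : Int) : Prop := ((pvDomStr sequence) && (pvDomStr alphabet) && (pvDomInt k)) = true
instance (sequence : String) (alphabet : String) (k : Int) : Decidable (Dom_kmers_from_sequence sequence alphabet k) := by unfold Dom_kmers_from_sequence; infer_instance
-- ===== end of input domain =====

-- B precomputes the alphabet-char positions and the filtered string in one pass and emits each
-- k-mer as a single slice of it (no per-kmer gap rescans); objective: alternative algorithm.
-- A and B are generators; the equivalence is about the list of yielded values.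
-- Python's `c in alphabet` on the single character c is char membership; ported as `c ∈ alphabet.toList` (exact).

-- ===== PORT A =====
-- inner `while` of A on the suffix of the sequence starting at char_check
-- (`char_check == len(sequence)` ↔ the suffix is empty; none = the `return`)
def pvInnerA (alpha : List Char) (k : Int) (rest kmer : List Char) : Option (List Char) :=
  if (kmer.length : Int) < k then
    match rest with
    | [] => none
    | c :: rs => pvInnerA alpha k rs (if c ∈ alpha then kmer ++ [c] else kmer)
  else some kmer
termination_by rest.length

-- outer `for itor in range(upper_bound)` of A: the suffix at itor plus the countdown of remaining iterations
def pvOuterA (alpha : List Char) (k : Int) : List Char → Nat → List String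
  | _, 0 => []
  | [], _ + 1 => []
  | c :: rs, rem + 1 =>
    if c ∈ alpha then
      match pvInnerA alpha k (c :: rs) [] with
      | none => []
      | some km => String.ofList km :: pvOuterA alpha k rs rem
    else pvOuterA alpha k rs rem

def kmers_from_sequence (sequence : String) (alphabet : String) (k : Int) : List String :=
  let s := sequence.toList
  pvOuterA alphabet.toList k s ((s.length : Int) - k + 1).toNat

-- ===== PORT B =====
-- the second loop of B (break = stop): j enumerates pos, p its element; filt holds the chars of
-- B's filtered string filtstr (a Python string slice is PySem.List.slice on its code points, exact)
def pvBLoop (filt : List Char) (ub k : Int) (total : Nat) : List Int → Nat → List String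
  | [], _ => []
  | p :: rest, j =>
    if p ≥ ub ∨ (j : Int) + k > (total : Int) then []
    else String.ofList (PySem.List.slice filt (some (j : Int)) (some ((j : Int) + k))) :: pvBLoop filt ub k total rest (j + 1)

def kmers_from_sequence_alt (sequence : String) (alphabet : String) (k : Int) : List String :=
  let s := sequence.toList
  let alpha := alphabet.toList
  let ub : Int := (s.length : Int) - k + 1
  -- first loop of B: build pos and filt by appending
  let pf := (PySem.List.enumerate s 0).foldl
    (fun (acc : List Int × List Char) ic =>
      if ic.2 ∈ alpha then (acc.1 ++ [ic.1], acc.2 ++ [ic.2]) else acc)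
    ([], [])
  pvBLoop pf.2 ub k pf.1.length pf.1 0

-- ===== PRECONDITION & SPEC =====
-- Pre_ excludes only k ≤ 0, on which the Python A always raises IndexError
-- (range(len-k+1) then reaches an index ≥ len(sequence)); A returns normally for every k ≥ 1.
def Pre_kmers_from_sequence (sequence : String) (alphabet : String) (k : Int) : Prop := 1 ≤ k
instance (sequence : String) (alphabet : String) (k : Int) : Decidable (Pre_kmers_from_sequence sequence alphabet k) := by unfold Pre_kmers_from_sequence; infer_instance

def pvWitness_kmers_from_sequence : String × String × Int := ("ACx-G T", "ACGT", 2)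

def Spec_kmers_from_sequence (sequence : String) (alphabet : String) (k : Int) (out : List String) : Prop := out = kmers_from_sequence_alt sequence alphabet k
instance (sequence : String) (alphabet : String) (k : Int) (out : List String) : Decidable (Spec_kmers_from_sequence sequence alphabet k out) := by unfold Spec_kmers_from_sequence; infer_instance

-- ===== CLAIM (what is proved, stated in full; the proofs are below) =====
def Claim_equal_kmers_from_sequence : Prop := ∀ (sequence : String) (alphabet : String) (k : Int), Dom_kmers_from_sequence sequence alphabet k → Pre_kmers_from_sequence sequence alphabet k → Spec_kmers_from_sequence sequence alphabet k (kmers_from_sequence sequence alphabet k)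

-- ===== LEMMAS AND PROOFS =====

-- global positions (as Python ints) of the alphabet chars of the suffix t starting at index i
def pvPosFrom (alpha : List Char) : List Char → Int → List Int
  | [], _ => []
  | c :: rs, i => if c ∈ alpha then i :: pvPosFrom alpha rs (i + 1) else pvPosFrom alpha rs (i + 1)

-- B's first loop computes (positions, filtered chars)
theorem pvScan_eq (alpha : List Char) (t : List Char) : ∀ (i : Int) (ps : List Int) (fs : List Char),
    (PySem.List.enumerate t i).foldl
      (fun (acc : List Int × List Char) ic =>
        if ic.2 ∈ alpha then (acc.1 ++ [ic.1], acc.2 ++ [ic.2]) else acc)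
      (ps, fs)
    = (ps ++ pvPosFrom alpha t i, fs ++ t.filter (· ∈ alpha)) := by
  induction t with
  | nil => intro i ps fs; simp [PySem.List.enumerate_nil, pvPosFrom]
  | cons c rs ih =>
    intro i ps fs
    rw [PySem.List.enumerate_cons]
    by_cases hc : c ∈ alpha <;> simp [List.foldl_cons, hc, pvPosFrom, ih]

-- characterisation of A's inner while-loop
theorem pvInnerA_eq (alpha : List Char) (k : Int) (rest : List Char) : ∀ (kmer : List Char),
    pvInnerA alpha k rest kmer =
      if (kmer.length : Int) < k then
        (if k ≤ (kmer.length : Int) + ((rest.filter (· ∈ alpha)).length : Int) then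
          some (kmer ++ (rest.filter (· ∈ alpha)).take (k - kmer.length).toNat)
        else none)
      else some kmer := by
  induction rest with
  | nil =>
    intro kmer
    unfold pvInnerA
    by_cases h : (kmer.length : Int) < k <;> simp [h] <;> omega
  | cons c rs ih =>
    intro kmer
    unfold pvInnerA
    by_cases h : (kmer.length : Int) < k
    · simp only [h, if_true]
      by_cases hc : c ∈ alpha
      · rw [if_pos hc, ih]
        simp only [List.length_append, List.length_cons, List.length_nil, List.filter_cons, hc,
          decide_true, if_true]
        push_cast
        by_cases h2 : (kmer.length : Int) + 1 < k
        · rw [if_pos h2]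
          by_cases h3 : k ≤ (kmer.length : Int) + 1 + ((rs.filter (· ∈ alpha)).length : Int)
          · rw [if_pos h3, if_pos (by omega)]
            have htake : (k - (kmer.length : Int)).toNat
                = ((k - ((kmer.length : Int) + 1)).toNat) + 1 := by omega
            rw [htake, List.take_succ_cons, List.append_assoc]
            rfl
          · rw [if_neg h3, if_neg (by omega)]
        · -- kmer ++ [c] already has length k
          rw [if_neg h2, if_pos (by omega)]
          have htake : (k - (kmer.length : Int)).toNat = 1 := by omega
          rw [htake, List.take_succ_cons, List.take_zero]
      · rw [if_neg hc, ih]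
        simp only [List.filter_cons, hc, decide_false, Bool.false_eq_true, if_false]
        rw [if_pos h]
    · simp [h]

theorem pvPosFrom_length (alpha : List Char) (t : List Char) : ∀ (i : Int),
    (pvPosFrom alpha t i).length = (t.filter (· ∈ alpha)).length := by
  induction t with
  | nil => intro i; simp [pvPosFrom]
  | cons c rs ih =>
    intro i
    by_cases hc : c ∈ alpha <;> simp [pvPosFrom, List.filter_cons, hc, ih]

-- the main loop correspondence
theorem pvMain (alpha : List Char) (k : Int) (ub : Int) (hk : 1 ≤ k) (t : List Char) :
    ∀ (i j : Nat) (filt : List Char),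
    filt.drop j = t.filter (· ∈ alpha) →
    j + (t.filter (· ∈ alpha)).length = filt.length →
    pvOuterA alpha k t (ub.toNat - i) = pvBLoop filt ub k filt.length (pvPosFrom alpha t (i : Int)) j := by
  induction t with
  | nil =>
    intro i j filt _ _
    cases h : ub.toNat - i <;> simp [pvOuterA, pvPosFrom, pvBLoop]
  | cons c rs ih =>
    intro i j filt hdrop hlen
    by_cases hrem : ub.toNat - i = 0
    · -- no iterations left: i ≥ ub
      have hub : ub ≤ (i : Int) := by omega
      rw [hrem]
      by_cases hc : c ∈ alpha
      · simp only [pvOuterA, pvPosFrom, hc, if_true, pvBLoop]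
        rw [if_pos (Or.inl hub)]
      · simp only [pvOuterA, pvPosFrom, hc, if_false]
        have hdrop' : filt.drop j = rs.filter (· ∈ alpha) := by
          simpa [List.filter_cons, hc] using hdrop
        have hlen' : j + (rs.filter (· ∈ alpha)).length = filt.length := by
          simpa [List.filter_cons, hc] using hlen
        have h2 := ih (i + 1) j filt hdrop' hlen'
        rw [show ub.toNat - (i + 1) = 0 by omega] at h2
        simp only [pvOuterA] at h2
        push_cast at h2 ⊢
        exact h2
    · obtain ⟨rem', hrem'⟩ : ∃ r, ub.toNat - i = r + 1 := ⟨ub.toNat - i - 1, by omega⟩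
      have hub : (i : Int) < ub := by omega
      have hrec : ub.toNat - (i + 1) = rem' := by omega
      by_cases hc : c ∈ alpha
      · -- head is an alphabet char at global position i
        have hF : (c :: rs).filter (· ∈ alpha) = c :: rs.filter (· ∈ alpha) := by
          simp [List.filter_cons, hc]
        rw [hrem']
        simp only [pvOuterA, hc, if_true, pvPosFrom, pvBLoop]
        have hI := pvInnerA_eq alpha k (c :: rs) []
        rw [if_pos (by simp; omega)] at hI
        simp only [List.length_nil, Nat.cast_zero, Int.sub_zero, zero_add, List.nil_append] at hI
        by_cases hEnough : k ≤ (((c :: rs).filter (· ∈ alpha)).length : Int)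
        · rw [if_pos hEnough] at hI
          rw [hI]
          have hjk : ¬ ((i : Int) ≥ ub ∨ (j : Int) + k > (filt.length : Int)) := by
            rw [not_or]
            constructor <;> omega
          rw [if_neg hjk]
          dsimp only
          have hslice : PySem.List.slice filt (some (j : Int)) (some ((j : Int) + k))
              = ((c :: rs).filter (· ∈ alpha)).take k.toNat := by
            rw [PySem.List.slice_toNat filt (by positivity) (by omega)]
            rw [show ((j : Int) + k).toNat - ((j : Int)).toNat = k.toNat by omega,
              show ((j : Int)).toNat = j by omega, hdrop]
          rw [hslice]
          have hdrop' : filt.drop (j + 1) = rs.filter (· ∈ alpha) := by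
            have hdd : filt.drop (j + 1) = (filt.drop j).drop 1 := by
              rw [List.drop_drop]
            rw [hdd, hdrop, hF]
            rfl
          have hlen' : (j + 1) + (rs.filter (· ∈ alpha)).length = filt.length := by
            rw [hF] at hlen
            simp only [List.length_cons] at hlen
            omega
          have h2 := ih (i + 1) (j + 1) filt hdrop' hlen'
          rw [hrec] at h2
          push_cast at h2
          rw [← h2]
        · rw [if_neg hEnough] at hI
          rw [hI]
          rw [if_pos (Or.inr (by omega))]
      · rw [hrem']
        simp only [pvOuterA, hc, if_false, pvPosFrom]
        have hdrop' : filt.drop j = rs.filter (· ∈ alpha) := by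
          simpa [List.filter_cons, hc] using hdrop
        have hlen' : j + (rs.filter (· ∈ alpha)).length = filt.length := by
          simpa [List.filter_cons, hc] using hlen
        have h2 := ih (i + 1) j filt hdrop' hlen'
        rw [hrec] at h2
        push_cast at h2 ⊢
        exact h2

-- ===== VERDICT (by name: the statement is the Claim_ definition above) =====
theorem kmers_from_sequence_spec : Claim_equal_kmers_from_sequence := by
  intro sequence alphabet k _ hk
  unfold Spec_kmers_from_sequence kmers_from_sequence kmers_from_sequence_alt
  show pvOuterA alphabet.toList k sequence.toList ((sequence.toList.length : Int) - k + 1).toNat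
      = pvBLoop _ ((sequence.toList.length : Int) - k + 1) k _ _ 0
  rw [pvScan_eq]
  simp only [List.nil_append]
  have hmain := pvMain alphabet.toList k ((sequence.toList.length : Int) - k + 1) hk sequence.toList
    0 0 (sequence.toList.filter (· ∈ alphabet.toList)) (by simp) (by simp)
  simpa [pvPosFrom_length] using hmain
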